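-- pv_equiv track=rewrite | github.com/ZigZag-Project/zigzag-v1 | classes/order.py | get_optimal_lpf_combination_triple
-- ===== SOURCE A (Python) =====
-- def get_optimal_lpf_combination_triple(size_1, en_1, size_2, en_2, size_3, en_3, node_size):
--     '''
--     Method to get the indexes of the optimal LPF combination for a triple operand shared memory.
--     '''
--
--     # Iterate through each combination.
--     # Save the indexes of minmal combination that fits size constraint.
--     n_1 = len(size_1)
--     n_2 = len(size_2)
--     n_3 = len(size_3)
--     en_min = float('inf')
--     i_min = None
--     j_min = None
--     k_min = None
--     for i in range(n_1):
--         for j in range(n_2):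
--             for k in range(n_3):
--                 size_comb = size_1[i] + size_2[j] + size_3[k]
--                 if size_comb > node_size:
--                     break
--                 else:
--                     en_comb = en_1[i] + en_2[j] + en_3[k]
--                     if en_comb <= en_min:
--                         en_min = en_comb
--                         i_min = i
--                         j_min = j
--                         k_min = k
--     return i_min, j_min, k_min
-- ===== SOURCE B (Python) =====
-- def get_optimal_lpf_combination_triple(size_1, en_1, size_2, en_2, size_3, en_3, node_size):
--     '''
--     Same result as the nested triple scan, but the size_3/en_3 dimension is
--     preprocessed once: a running-max table over size_3 (so the scan's break
--     point becomes a binary search) and a best-(energy, last index) table per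
--     prefix length of en_3. Each (i, j) pair then costs O(log n_3).
--     '''
--     # running max of size_3: pmax[k] = max(size_3[0..k]); non-decreasing
--     pmax = []
--     m = None
--     for s in size_3:
--         if m is None or s > m:
--             m = s
--         pmax.append(m)
--     # best[L] = (min energy over en_3[0:L], last index attaining it), best[0] = None
--     best = [None]
--     b = None
--     for k in range(len(en_3)):
--         e = en_3[k]
--         if b is None or e <= b[0]:
--             b = (e, k)
--         best.append(b)
--     en_min = None
--     res = (None, None, None)
--     for i in range(len(size_1)):
--         base_s = size_1[i]
--         for j in range(len(size_2)):
--             t = node_size - base_s - size_2[j]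
--             # binary search: L = number of leading pmax entries <= t
--             lo, hi = 0, len(pmax)
--             while lo < hi:
--                 mid = (lo + hi) // 2
--                 if pmax[mid] <= t:
--                     lo = mid + 1
--                 else:
--                     hi = mid
--             if lo == 0:
--                 continue
--             e3, k = best[lo]
--             tot = en_1[i] + en_2[j] + e3
--             if en_min is None or tot <= en_min:
--                 en_min = tot
--                 res = (i, j, k)
--     return res
-- ===== Notes on version B (the rewrite author's own statement) =====
-- stated objective: faster
-- what changed: The inner scan over size_3/en_3 is replaced by one-time preprocessing (a running-max table over size_3 and a per-prefix (min-energy, last-index) table over en_3) so that each (i,j) pair is resolved by a binary search instead of a linear break-scan.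
import Mathlib
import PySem

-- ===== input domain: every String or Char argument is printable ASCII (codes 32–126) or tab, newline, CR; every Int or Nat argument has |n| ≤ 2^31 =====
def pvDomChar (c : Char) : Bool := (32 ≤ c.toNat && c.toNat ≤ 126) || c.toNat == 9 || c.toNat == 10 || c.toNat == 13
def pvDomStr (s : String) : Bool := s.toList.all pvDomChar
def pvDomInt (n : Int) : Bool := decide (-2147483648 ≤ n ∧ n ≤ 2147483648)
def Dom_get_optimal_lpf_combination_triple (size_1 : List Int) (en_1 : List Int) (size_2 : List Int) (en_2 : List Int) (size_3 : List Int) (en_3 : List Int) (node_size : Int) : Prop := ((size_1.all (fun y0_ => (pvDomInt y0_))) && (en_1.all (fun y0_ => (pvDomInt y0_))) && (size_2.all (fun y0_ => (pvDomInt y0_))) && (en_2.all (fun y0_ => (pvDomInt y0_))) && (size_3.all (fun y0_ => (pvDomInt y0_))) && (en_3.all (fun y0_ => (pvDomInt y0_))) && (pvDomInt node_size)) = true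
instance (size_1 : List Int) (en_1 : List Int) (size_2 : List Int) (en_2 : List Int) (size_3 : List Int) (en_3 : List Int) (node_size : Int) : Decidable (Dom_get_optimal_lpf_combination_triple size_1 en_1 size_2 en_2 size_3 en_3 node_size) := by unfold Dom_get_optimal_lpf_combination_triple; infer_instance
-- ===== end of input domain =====

-- ===== PORT A =====
-- B is faster by preprocessing the third dimension: a running-max table over
-- size_3 turns A's inner break-scan into a binary search, and a per-prefix
-- (min-energy, last index) table over en_3 replaces the inner minimum scan.

-- state (en_min, i_min, j_min, k_min); None = float('inf') for en_min
def pvLeOpt (x : Int) : Option Int → Bool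
  | none => true
  | some m => x ≤ m

-- indices as Python ints; rendering of `for idx in range(...)` with parallel indexing
def pvEnumFrom {α : Type} (k : Int) : List α → List (Int × α)
  | [] => []
  | x :: r => (k, x) :: pvEnumFrom (k + 1) r

-- A's innermost `for k in range(n_3)` loop with its `break`
def pvLoopK (node_size s1 e1 s2 e2 i j : Int) :
    List (Int × Int × Int) → (Option Int × Option Int × Option Int × Option Int) →
    (Option Int × Option Int × Option Int × Option Int)
  | [], s => s
  | (k, sz, en) :: rest, s =>
    if s1 + s2 + sz > node_size then s
    else
      let en_comb := e1 + e2 + en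
      pvLoopK node_size s1 e1 s2 e2 i j rest
        (if pvLeOpt en_comb s.1 then (some en_comb, some i, some j, some k) else s)

def get_optimal_lpf_combination_triple (size_1 : List Int) (en_1 : List Int) (size_2 : List Int) (en_2 : List Int) (size_3 : List Int) (en_3 : List Int) (node_size : Int) : Option Int × Option Int × Option Int :=
  -- index accesses size_l[i]/en_l[i] rendered through zip; exact whenever the
  -- en lists are at least as long as the size lists (Pre_), where A never raises
  let s := (pvEnumFrom 0 (size_1.zip en_1)).foldl (fun s pi =>
    (pvEnumFrom 0 (size_2.zip en_2)).foldl (fun s pj =>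
      pvLoopK node_size pi.2.1 pi.2.2 pj.2.1 pj.2.2 pi.1 pj.1
        (pvEnumFrom 0 (size_3.zip en_3)) s) s)
    ((none, none, none, none) : Option Int × Option Int × Option Int × Option Int)
  (s.2.1, s.2.2.1, s.2.2.2)

-- ===== PORT B =====
-- running max of size_3 (pmax in Source B); loop-with-append as structural recursion
def pvBuildPmax : Option Int → List Int → List Int
  | _, [] => []
  | m, s :: rest =>
    let m' := match m with
      | none => s
      | some mv => if s > mv then s else mv
    m' :: pvBuildPmax (some m') rest

-- Source B's `if b is None or e <= b[0]: b = (e, k)`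
def pvUpdB (b : Option (Int × Int)) (e : Int) (k : Int) : Option (Int × Int) :=
  match b with
  | none => some (e, k)
  | some (be, bk) => if e ≤ be then some (e, k) else some (be, bk)

-- the tail of Source B's `best` table (best = none :: this)
def pvBuildBest (b : Option (Int × Int)) (k : Int) : List Int → List (Option (Int × Int))
  | [] => []
  | e :: rest =>
    let b' := pvUpdB b e k
    b' :: pvBuildBest b' (k + 1) rest

-- Source B's while-loop binary search; pmax[mid] always in range when lo < hi ≤ length
def pvBsearch (p : List Int) (t : Int) (lo hi : Nat) : Nat :=
  if lo < hi then
    if p.getD ((lo + hi) / 2) 0 ≤ t then pvBsearch p t ((lo + hi) / 2 + 1) hi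
    else pvBsearch p t lo ((lo + hi) / 2)
  else lo
termination_by hi - lo
decreasing_by all_goals omega

def get_optimal_lpf_combination_triple_alt (size_1 : List Int) (en_1 : List Int) (size_2 : List Int) (en_2 : List Int) (size_3 : List Int) (en_3 : List Int) (node_size : Int) : Option Int × Option Int × Option Int :=
  let pmax := pvBuildPmax none size_3
  let best : List (Option (Int × Int)) := none :: pvBuildBest none 0 en_3
  let s := (pvEnumFrom 0 (size_1.zip en_1)).foldl (fun s pi =>
    (pvEnumFrom 0 (size_2.zip en_2)).foldl (fun s pj =>
      let t := node_size - pi.2.1 - pj.2.1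
      let L := pvBsearch pmax t 0 pmax.length
      if L = 0 then s
      else
        match best.getD L none with
        | none => s   -- unreachable under Pre_ (best is long enough); Python raises here
        | some (e3, k) =>
          let tot := pi.2.2 + pj.2.2 + e3
          if pvLeOpt tot s.1 then (some tot, some pi.1, some pj.1, some k) else s) s)
    ((none, none, none, none) : Option Int × Option Int × Option Int × Option Int)
  (s.2.1, s.2.2.1, s.2.2.2)

-- ===== PRECONDITION & SPEC =====
-- Pre_ is exactly the closed-form condition under which Python A returns normally:
-- an energy entry en_l[x] is read iff the size combination fits at the first k, so A
-- raises IndexError iff a fitting combination reaches past the end of an en list.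
def Pre_get_optimal_lpf_combination_triple (size_1 : List Int) (en_1 : List Int) (size_2 : List Int) (en_2 : List Int) (size_3 : List Int) (en_3 : List Int) (node_size : Int) : Prop :=
  (∀ a ∈ size_1.drop en_1.length, ∀ b ∈ size_2, ∀ c ∈ size_3.take 1, node_size < a + b + c) ∧
  (∀ b ∈ size_2.drop en_2.length, ∀ a ∈ size_1, ∀ c ∈ size_3.take 1, node_size < a + b + c) ∧
  (size_3.length ≤ en_3.length ∨
    ∀ a ∈ size_1, ∀ b ∈ size_2, ∃ c ∈ size_3.take (en_3.length + 1), node_size < a + b + c)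
instance (size_1 : List Int) (en_1 : List Int) (size_2 : List Int) (en_2 : List Int) (size_3 : List Int) (en_3 : List Int) (node_size : Int) : Decidable (Pre_get_optimal_lpf_combination_triple size_1 en_1 size_2 en_2 size_3 en_3 node_size) := by unfold Pre_get_optimal_lpf_combination_triple; infer_instance

def pvWitness_get_optimal_lpf_combination_triple : List Int × List Int × List Int × List Int × List Int × List Int × Int :=
  ([1, 2], [5, 3], [1], [4], [1, 2, 3], [9, 7, 8], 5)

def Spec_get_optimal_lpf_combination_triple (size_1 : List Int) (en_1 : List Int) (size_2 : List Int) (en_2 : List Int) (size_3 : List Int) (en_3 : List Int) (node_size : Int) (out : Option Int × Option Int × Option Int) : Prop := out = get_optimal_lpf_combination_triple_alt size_1 en_1 size_2 en_2 size_3 en_3 node_size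
instance (size_1 : List Int) (en_1 : List Int) (size_2 : List Int) (en_2 : List Int) (size_3 : List Int) (en_3 : List Int) (node_size : Int) (out : Option Int × Option Int × Option Int) : Decidable (Spec_get_optimal_lpf_combination_triple size_1 en_1 size_2 en_2 size_3 en_3 node_size out) := by unfold Spec_get_optimal_lpf_combination_triple; infer_instance

-- ===== CLAIM (what is proved, stated in full; the proofs are below) =====
def Claim_equal_get_optimal_lpf_combination_triple : Prop := ∀ (size_1 : List Int) (en_1 : List Int) (size_2 : List Int) (en_2 : List Int) (size_3 : List Int) (en_3 : List Int) (node_size : Int), Dom_get_optimal_lpf_combination_triple size_1 en_1 size_2 en_2 size_3 en_3 node_size → Pre_get_optimal_lpf_combination_triple size_1 en_1 size_2 en_2 size_3 en_3 node_size → Spec_get_optimal_lpf_combination_triple size_1 en_1 size_2 en_2 size_3 en_3 node_size (get_optimal_lpf_combination_triple size_1 en_1 size_2 en_2 size_3 en_3 node_size)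

-- ===== LEMMAS AND PROOFS =====

-- length of the maximal prefix of l whose entries are ≤ t
def pvPfxLen (t : Int) : List Int → Nat
  | [] => 0
  | s :: r => if s ≤ t then pvPfxLen t r + 1 else 0

-- the minimum of a list with last-index tie-breaking, as a left fold of pvUpdB
def pvBestFold (b : Option (Int × Int)) (k : Int) : List Int → Option (Int × Int)
  | [] => b
  | e :: r => pvBestFold (pvUpdB b e k) (k + 1) r

theorem pvPfxLen_le (t : Int) (l : List Int) : pvPfxLen t l ≤ l.length := by
  induction l with
  | nil => simp [pvPfxLen]
  | cons s r ih => simp only [pvPfxLen, List.length_cons]; split <;> omega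

theorem pvBuildPmax_length (m : Option Int) (l : List Int) :
    (pvBuildPmax m l).length = l.length := by
  induction l generalizing m with
  | nil => rfl
  | cons s r ih => simp [pvBuildPmax, ih]

-- the running-max table decides prefix membership
theorem pvBuildPmax_le_iff (t : Int) (l : List Int) (m : Option Int) (x : Nat)
    (hx : x < l.length) :
    ((pvBuildPmax m l).getD x 0 ≤ t ↔ ((∀ a ∈ m, a ≤ t) ∧ x < pvPfxLen t l)) := by
  induction l generalizing m x with
  | nil => simp at hx
  | cons s r ih =>
    cases x with
    | zero =>
      cases m with
      | none =>
        simp only [pvBuildPmax, List.getD_cons_zero, pvPfxLen]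
        constructor
        · intro h; refine ⟨by simp, ?_⟩; rw [if_pos h]; omega
        · rintro ⟨-, h⟩; by_contra hc; rw [if_neg hc] at h; omega
      | some mv =>
        simp only [pvBuildPmax, List.getD_cons_zero, pvPfxLen, Option.mem_def]
        constructor
        · intro h
          split at h
          · refine ⟨fun a ha => ?_, ?_⟩
            · injection ha with ha; omega
            · rw [if_pos h]; omega
          · refine ⟨fun a ha => ?_, ?_⟩
            · injection ha with ha; omega
            · have hs : s ≤ t := by omega
              rw [if_pos hs]; omega
        · rintro ⟨hm, h⟩
          have hmv : mv ≤ t := hm mv rfl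
          have hs : s ≤ t := by by_contra hc; rw [if_neg hc] at h; omega
          split <;> omega
    | succ x' =>
      simp only [pvBuildPmax, List.getD_cons_succ, pvPfxLen]
      rw [ih _ _ (by simpa using hx)]
      cases m with
      | none =>
        simp only [Option.mem_def]
        constructor
        · rintro ⟨hm, h⟩
          have hs : s ≤ t := hm s rfl
          refine ⟨by simp, ?_⟩; rw [if_pos hs]; omega
        · rintro ⟨-, h⟩
          have hs : s ≤ t := by by_contra hc; rw [if_neg hc] at h; omega
          rw [if_pos hs] at h
          refine ⟨fun a ha => ?_, by omega⟩
          injection ha with ha; omega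
      | some mv =>
        simp only [Option.mem_def]
        constructor
        · rintro ⟨hm, h⟩
          have hmx : (if s > mv then s else mv) ≤ t := hm _ rfl
          have hs : s ≤ t := by split at hmx <;> omega
          have hmv : mv ≤ t := by split at hmx <;> omega
          refine ⟨fun a ha => by injection ha with ha; omega, ?_⟩
          rw [if_pos hs]; omega
        · rintro ⟨hm, h⟩
          have hmv : mv ≤ t := hm mv rfl
          have hs : s ≤ t := by by_contra hc; rw [if_neg hc] at h; omega
          rw [if_pos hs] at h
          refine ⟨fun a ha => ?_, by omega⟩
          injection ha with ha; subst ha; split <;> omega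

-- correctness of the binary search against a monotone decision L
theorem pvBsearch_eq (p : List Int) (t : Int) (L : Nat)
    (Hc : ∀ x, x < p.length → (p.getD x 0 ≤ t ↔ x < L)) :
    ∀ n lo hi, hi - lo ≤ n → lo ≤ L → L ≤ hi → hi ≤ p.length →
      pvBsearch p t lo hi = L := by
  intro n
  induction n with
  | zero =>
    intro lo hi h1 h2 h3 h4
    rw [pvBsearch, if_neg (by omega)]; omega
  | succ n ih =>
    intro lo hi h1 h2 h3 h4
    rw [pvBsearch]
    by_cases hlt : lo < hi
    · rw [if_pos hlt]
      have hmid : (lo + hi) / 2 < p.length := by omega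
      by_cases hp : p.getD ((lo + hi) / 2) 0 ≤ t
      · rw [if_pos hp]
        have := (Hc _ hmid).mp hp
        exact ih _ _ (by omega) (by omega) h3 h4
      · rw [if_neg hp]
        have : ¬ ((lo + hi) / 2 < L) := fun hc => hp ((Hc _ hmid).mpr hc)
        exact ih _ _ (by omega) h2 (by omega) (by omega)
    · rw [if_neg hlt]; omega

theorem pvBsearch_pfx (t : Int) (size_3 : List Int) :
    pvBsearch (pvBuildPmax none size_3) t 0 (pvBuildPmax none size_3).length
      = pvPfxLen t size_3 := by
  apply pvBsearch_eq _ _ _ ?_ (pvBuildPmax none size_3).length _ _ le_rfl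
    (Nat.zero_le _) ?_ le_rfl
  · intro x hx
    rw [pvBuildPmax_length] at hx
    rw [pvBuildPmax_le_iff t size_3 none x hx]
    simp
  · rw [pvBuildPmax_length]; exact pvPfxLen_le t size_3

-- the best table at position L - 1 is the fold over the length-L prefix
theorem pvBuildBest_getD (l : List Int) :
    ∀ (b : Option (Int × Int)) (k : Int) (L : Nat), 1 ≤ L → L ≤ l.length →
      (pvBuildBest b k l).getD (L - 1) none = pvBestFold b k (l.take L) := by
  induction l with
  | nil => intro b k L h1 h2; simp at h2; omega
  | cons e r ih =>
    intro b k L h1 h2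
    match L, h1 with
    | 1, _ => simp [pvBuildBest, pvBestFold]
    | (L' + 2), _ =>
      have : (L' + 2) - 1 = (L' + 1 - 1) + 1 := by omega
      rw [this]
      simp only [pvBuildBest, List.getD_cons_succ, List.take_succ_cons, pvBestFold]
      exact ih _ _ (L' + 1) (by omega) (by simpa using h2)

-- B's per-(i,j) combining step, as a function of the folded best value
def pvF (e1 e2 i j : Int) (s : Option Int × Option Int × Option Int × Option Int)
    (b : Option (Int × Int)) : Option Int × Option Int × Option Int × Option Int :=
  match b with
  | none => s
  | some (e3, k) =>
    let tot := e1 + e2 + e3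
    if pvLeOpt tot s.1 then (some tot, some i, some j, some k) else s

-- one combining step on a folded value commutes with one pvUpdB step
theorem pvStep_hom (e1 e2 i j k e : Int) (s : Option Int × Option Int × Option Int × Option Int)
    (b : Option (Int × Int)) :
    (if pvLeOpt (e1 + e2 + e) (pvF e1 e2 i j s b).1 then
        (some (e1 + e2 + e), some i, some j, some k) else pvF e1 e2 i j s b)
      = pvF e1 e2 i j s (pvUpdB b e k) := by
  obtain ⟨s1, srest⟩ := s
  cases b with
  | none => rfl
  | some p =>
    obtain ⟨be, bk⟩ := p
    cases s1 with
    | none =>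
      simp only [pvF, pvUpdB, pvLeOpt]
      split_ifs <;> simp_all
    | some mv =>
      simp only [pvF, pvUpdB, pvLeOpt]
      split_ifs <;> simp_all <;> omega

-- homomorphism: A's candidate fold equals pvF of the pvBestFold value
theorem pvFold_hom (e1 e2 i j : Int) (l : List Int) :
    ∀ (k : Int) (s : Option Int × Option Int × Option Int × Option Int)
      (b : Option (Int × Int)),
    List.foldl (fun s (p : Int × Int) =>
        if pvLeOpt (e1 + e2 + p.2) s.1 then (some (e1 + e2 + p.2), some i, some j, some p.1) else s)
      (pvF e1 e2 i j s b) (pvEnumFrom k l)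
    = pvF e1 e2 i j s (pvBestFold b k l) := by
  induction l with
  | nil => intro k s b; rfl
  | cons e r ih =>
    intro k s b
    simp only [pvEnumFrom, List.foldl_cons, pvBestFold]
    rw [pvStep_hom e1 e2 i j k e s b]
    exact ih (k + 1) s (pvUpdB b e k)

-- A's break-scan over the third dimension reduces to a fold over the fitting prefix
theorem pvLoopK_eq (node_size s1 e1 s2 e2 i j : Int) (sz : List Int) :
    ∀ (en : List Int) (k : Int) (s : Option Int × Option Int × Option Int × Option Int),
      pvLoopK node_size s1 e1 s2 e2 i j (pvEnumFrom k (sz.zip en)) s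
      = List.foldl (fun s (p : Int × Int) =>
          if pvLeOpt (e1 + e2 + p.2) s.1 then (some (e1 + e2 + p.2), some i, some j, some p.1) else s)
        s (pvEnumFrom k (en.take (pvPfxLen (node_size - s1 - s2) sz))) := by
  induction sz with
  | nil => intro en k s; simp [pvLoopK, pvPfxLen, pvEnumFrom]
  | cons s0 szr ih =>
    intro en k s
    cases en with
    | nil => simp [pvLoopK, pvEnumFrom]
    | cons e0 enr =>
      simp only [List.zip_cons_cons, pvEnumFrom, pvLoopK, pvPfxLen]
      by_cases hb : s1 + s2 + s0 > node_size
      · rw [if_pos hb, if_neg (by omega)]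
        simp [pvEnumFrom]
      · rw [if_neg hb, if_pos (show s0 ≤ node_size - s1 - s2 by omega)]
        simp only [List.take_succ_cons, pvEnumFrom, List.foldl_cons]
        exact ih enr (k + 1) _

-- the two per-(i,j) bodies agree
theorem pvStep_eq (node_size : Int) (size_3 en_3 : List Int) (s1 e1 s2 e2 i j : Int)
    (h3 : pvPfxLen (node_size - s1 - s2) size_3 = 0 ∨
          pvPfxLen (node_size - s1 - s2) size_3 ≤ en_3.length) (s : Option Int × Option Int × Option Int × Option Int) :
    pvLoopK node_size s1 e1 s2 e2 i j (pvEnumFrom 0 (size_3.zip en_3)) s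
    = (let t := node_size - s1 - s2
       let pmax := pvBuildPmax none size_3
       let L := pvBsearch pmax t 0 pmax.length
       if L = 0 then s
       else
         match (none :: pvBuildBest none 0 en_3).getD L none with
         | none => s
         | some (e3, k) =>
           let tot := e1 + e2 + e3
           if pvLeOpt tot s.1 then (some tot, some i, some j, some k) else s) := by
  set t := node_size - s1 - s2 with ht
  have hL : pvBsearch (pvBuildPmax none size_3) t 0 (pvBuildPmax none size_3).length
      = pvPfxLen t size_3 := pvBsearch_pfx t size_3
  rw [pvLoopK_eq node_size s1 e1 s2 e2 i j size_3 en_3 0 s]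
  have hfold := pvFold_hom e1 e2 i j (en_3.take (pvPfxLen t size_3)) 0 s none
  simp only [pvF] at hfold
  rw [hfold]
  simp only [hL]
  by_cases h0 : pvPfxLen t size_3 = 0
  · rw [if_pos h0, h0]
    simp [List.take_zero, pvBestFold]
  · rw [if_neg h0]
    have hlen : pvPfxLen t size_3 ≤ en_3.length := by
      rcases h3 with h3 | h3 <;> omega
    have hgd : (none :: pvBuildBest none 0 en_3).getD (pvPfxLen t size_3) none
        = pvBestFold none 0 (en_3.take (pvPfxLen t size_3)) := by
      obtain ⟨L', hL'⟩ : ∃ L', pvPfxLen t size_3 = L' + 1 :=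
        ⟨pvPfxLen t size_3 - 1, by omega⟩
      rw [hL', List.getD_cons_succ]
      have := pvBuildBest_getD en_3 none 0 (L' + 1) (by omega) (by omega)
      simpa using this
    rw [hgd]

-- fold congruence over the outer loops (pointwise on members)
theorem pvFoldl_congr_mem {α β : Type} (l : List β) (f g : α → β → α) (s : α)
    (h : ∀ (a : α), ∀ b ∈ l, f a b = g a b) : List.foldl f s l = List.foldl g s l := by
  induction l generalizing s with
  | nil => rfl
  | cons x r ih =>
    simp only [List.foldl_cons, h _ x List.mem_cons_self]
    exact ih _ (fun a b hb => h a b (List.mem_cons_of_mem x hb))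

theorem pvEnumFrom_mem {α : Type} (l : List α) :
    ∀ (k : Int) (p : Int × α), p ∈ pvEnumFrom k l → p.2 ∈ l := by
  induction l with
  | nil => intro k p hp; simp [pvEnumFrom] at hp
  | cons x r ih =>
    intro k p hp
    rcases (List.mem_cons.mp hp) with h | h
    · subst h; simp
    · exact List.mem_cons_of_mem x (ih (k + 1) p h)

-- every element of the fitting prefix fits
theorem pvPfx_mem_le (t : Int) (l : List Int) :
    ∀ c ∈ l.take (pvPfxLen t l), c ≤ t := by
  induction l with
  | nil => simp
  | cons s r ih =>
    intro c hc
    simp only [pvPfxLen] at hc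
    by_cases hs : s ≤ t
    · rw [if_pos hs, List.take_succ_cons] at hc
      rcases List.mem_cons.mp hc with h | h
      · omega
      · exact ih c h
    · rw [if_neg hs] at hc; simp at hc

-- an oversized element among the first n+1 bounds the fitting prefix by n
theorem pvPfxLen_le_of_exists (t : Int) (l : List Int) (n : Nat)
    (h : ∃ c ∈ l.take (n + 1), t < c) : pvPfxLen t l ≤ n := by
  obtain ⟨c, hc, hlt⟩ := h
  by_contra hgt
  have hsub : l.take (n + 1) ⊆ l.take (pvPfxLen t l) := by
    have : (l.take (pvPfxLen t l)).take (n + 1) = l.take (n + 1) := by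
      rw [List.take_take]; congr 1; omega
    rw [← this]; exact List.take_subset _ _
  have := pvPfx_mem_le t l c (hsub hc)
  omega

-- ===== VERDICT (by name: the statement is the Claim_ definition above) =====
theorem get_optimal_lpf_combination_triple_spec : Claim_equal_get_optimal_lpf_combination_triple := by
  intro size_1 en_1 size_2 en_2 size_3 en_3 node_size _ hpre
  obtain ⟨-, -, hP3⟩ := hpre
  unfold Spec_get_optimal_lpf_combination_triple
  unfold get_optimal_lpf_combination_triple get_optimal_lpf_combination_triple_alt
  refine congrArg (fun s : Option Int × Option Int × Option Int × Option Int =>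
      (s.2.1, s.2.2.1, s.2.2.2)) ?_
  refine pvFoldl_congr_mem _ _ _ _ ?_
  intro s pi hpi
  refine pvFoldl_congr_mem _ _ _ _ ?_
  intro s' pj hpj
  have hai : pi.2.1 ∈ size_1 :=
    (List.of_mem_zip (show (pi.2.1, pi.2.2) ∈ size_1.zip en_1 by
      simpa using pvEnumFrom_mem _ _ _ hpi)).1
  have hbj : pj.2.1 ∈ size_2 :=
    (List.of_mem_zip (show (pj.2.1, pj.2.2) ∈ size_2.zip en_2 by
      simpa using pvEnumFrom_mem _ _ _ hpj)).1
  apply pvStep_eq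
  rcases hP3 with h3 | h3
  · right; exact le_trans (pvPfxLen_le _ size_3) h3
  · by_cases h0 : pvPfxLen (node_size - pi.2.1 - pj.2.1) size_3 = 0
    · left; exact h0
    · right
      apply pvPfxLen_le_of_exists
      obtain ⟨c, hc, hlt⟩ := h3 pi.2.1 hai pj.2.1 hbj
      exact ⟨c, hc, by omega⟩
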